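-- pv_equiv track=rewrite | github.com/IrakliGLD/langchain_railway | evaluation_engine.py | filter_queries
-- ===== SOURCE A (Python) =====
-- from typing import Dict, List, Any, Tuple, Optional
--
-- def filter_queries(
--     queries: List[Dict[str, Any]],
--     mode: str = "quick",
--     query_type: Optional[str] = None,
--     query_id: Optional[str] = None
-- ) -> List[Dict[str, Any]]:
--     """
--     Filter queries based on mode and filters.
--
--     Args:
--         queries: Full list of queries
--         mode: 'full' or 'quick'
--         query_type: Filter by type (single_value, list, comparison, trend, analyst)
--         query_id: Filter by specific ID
--
--     Returns:
--         Filtered list of queries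
--     """
--     if query_id:
--         return [q for q in queries if q["id"] == query_id]
--
--     if query_type:
--         queries = [q for q in queries if q["type"] == query_type]
--
--     if mode == "quick" and not query_type and not query_id:
--         # Representative sample: 2 of each type
--         sample_queries = []
--         for qtype in ["single_value", "list", "comparison", "trend", "analyst"]:
--             type_queries = [q for q in queries if q["type"] == qtype]
--             sample_queries.extend(type_queries[:2])
--         return sample_queries
--
--     return queries
-- ===== SOURCE B (Python) =====
-- def filter_queries(queries, mode="quick", query_type=None, query_id=None):
--     # exact-match filters collapse into one generic key/value filter
--     if query_id:
--         key, want = "id", query_id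
--     elif query_type:
--         key, want = "type", query_type
--     else:
--         key = want = None
--     if key is not None:
--         return [q for q in queries if q[key] == want]
--     if mode != "quick":
--         return queries
--     # quick sampling: one pass keeping at most 2 queries per known type
--     order = ["single_value", "list", "comparison", "trend", "analyst"]
--     picked = {t: [] for t in order}
--     for q in queries:
--         t = q["type"]
--         if t in picked and len(picked[t]) < 2:
--             picked[t].append(q)
--     return [q for t in order for q in picked[t]]
-- ===== Notes on version B (the rewrite author's own statement) =====
-- stated objective: alternative
-- what changed: The two exact-match filters are merged into one generic key/value filter, and quick-mode sampling is a single pass that keeps at most 2 queries per type in a capped per-type bucket dict (online capped grouping), emitted over the fixed type order, instead of five separate full scans each followed by a [:2] slice.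
import Mathlib
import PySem

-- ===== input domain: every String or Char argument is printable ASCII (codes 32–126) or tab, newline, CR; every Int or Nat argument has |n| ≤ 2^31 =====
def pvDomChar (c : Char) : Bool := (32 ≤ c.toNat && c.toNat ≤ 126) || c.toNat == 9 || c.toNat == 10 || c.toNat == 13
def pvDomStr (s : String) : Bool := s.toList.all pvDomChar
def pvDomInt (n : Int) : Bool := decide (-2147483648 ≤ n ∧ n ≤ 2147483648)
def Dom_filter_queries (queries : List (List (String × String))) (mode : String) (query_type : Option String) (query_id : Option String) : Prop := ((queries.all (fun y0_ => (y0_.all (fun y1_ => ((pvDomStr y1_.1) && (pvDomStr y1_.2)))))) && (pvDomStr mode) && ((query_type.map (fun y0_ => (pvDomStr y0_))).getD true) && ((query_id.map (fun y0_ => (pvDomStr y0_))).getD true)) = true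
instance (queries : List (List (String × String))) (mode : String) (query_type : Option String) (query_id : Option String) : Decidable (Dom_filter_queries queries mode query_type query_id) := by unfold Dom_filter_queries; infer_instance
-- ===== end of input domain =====

-- B merges the two exact-match filters into one generic key/value filter and replaces the
-- five quick-mode scans by one pass keeping at most 2 queries per type (capped buckets).

-- Python truthiness of an Optional[str]: None and "" are falsy.
def pvTruthy (o : Option String) : Bool :=
  match o with
  | none => false
  | some s => s ≠ ""

-- ===== PORT A =====
def filter_queries (queries : List (List (String × String))) (mode : String) (query_type : Option String) (query_id : Option String) : List (List (String × String)) :=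
  if pvTruthy query_id then
    queries.filter (fun q => PySem.Dict.get? (PySem.Dict.mk q) "id" == query_id)
  else
    let queries1 :=
      if pvTruthy query_type then
        queries.filter (fun q => PySem.Dict.get? (PySem.Dict.mk q) "type" == query_type)
      else queries
    if mode == "quick" && !pvTruthy query_type && !pvTruthy query_id then
      ["single_value", "list", "comparison", "trend", "analyst"].foldl
        (fun sample qtype =>
          sample ++ (queries1.filter (fun q => PySem.Dict.get? (PySem.Dict.mk q) "type" == some qtype)).take 2)
        []
    else queries1

-- ===== PORT B =====
def pvOrder : List String := ["single_value", "list", "comparison", "trend", "analyst"]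

-- one pass over queries: append q to its type's bucket unless that bucket already holds 2
def pvPick (queries : List (List (String × String))) : PySem.Dict String (List (List (String × String))) :=
  queries.foldl
    (fun d q =>
      let t := (PySem.Dict.get? (PySem.Dict.mk q) "type").getD ""
      if pvOrder.contains t && (d.getD t []).length < 2 then d.modify t [] (· ++ [q]) else d)
    (pvOrder.foldl (fun d t => d.insert t ([] : List (List (String × String)))) PySem.Dict.empty)

def filter_queries_alt (queries : List (List (String × String))) (mode : String) (query_type : Option String) (query_id : Option String) : List (List (String × String)) :=
  let kw : Option (String × String) :=
    if pvTruthy query_id then some ("id", query_id.getD "")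
    else if pvTruthy query_type then some ("type", query_type.getD "")
    else none
  match kw with
  | some (k, w) => queries.filter (fun q => PySem.Dict.get? (PySem.Dict.mk q) k == some w)
  | none =>
    if mode ≠ "quick" then queries
    else pvOrder.flatMap (fun t => (pvPick queries).getD t [])

-- ===== PRECONDITION & SPEC =====
-- Pre_ excludes exactly the inputs where Python A raises KeyError: a query missing the
-- key "id" when filtering by id, or missing "type" when filtering by type / quick sampling.
def Pre_filter_queries (queries : List (List (String × String))) (mode : String) (query_type : Option String) (query_id : Option String) : Prop :=
  if pvTruthy query_id then
    ∀ q ∈ queries, (PySem.Dict.get? (PySem.Dict.mk q) "id").isSome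
  else if pvTruthy query_type || mode == "quick" then
    ∀ q ∈ queries, (PySem.Dict.get? (PySem.Dict.mk q) "type").isSome
  else True
instance (queries : List (List (String × String))) (mode : String) (query_type : Option String) (query_id : Option String) : Decidable (Pre_filter_queries queries mode query_type query_id) := by unfold Pre_filter_queries; infer_instance

def pvWitness_filter_queries : (List (List (String × String))) × String × Option String × Option String :=
  ([[("id", "a"), ("type", "list")], [("id", "b"), ("type", "trend")]], "quick", none, none)

def Spec_filter_queries (queries : List (List (String × String))) (mode : String) (query_type : Option String) (query_id : Option String) (out : List (List (String × String))) : Prop := out = filter_queries_alt queries mode query_type query_id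
instance (queries : List (List (String × String))) (mode : String) (query_type : Option String) (query_id : Option String) (out : List (List (String × String))) : Decidable (Spec_filter_queries queries mode query_type query_id out) := by unfold Spec_filter_queries; infer_instance

-- ===== CLAIM (what is proved, stated in full; the proofs are below) =====
def Claim_equal_filter_queries : Prop := ∀ (queries : List (List (String × String))) (mode : String) (query_type : Option String) (query_id : Option String), Dom_filter_queries queries mode query_type query_id → Pre_filter_queries queries mode query_type query_id → Spec_filter_queries queries mode query_type query_id (filter_queries queries mode query_type query_id)

-- ===== LEMMAS AND PROOFS =====

-- The capped bucket at a known type t is the first 2 queries of that type, in order.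
theorem pvPick_getD (queries : List (List (String × String))) (t : String) (ht : t ∈ pvOrder) :
    (pvPick queries).getD t []
      = (queries.filter (fun q => (PySem.Dict.get? (PySem.Dict.mk q) "type").getD "" == t)).take 2 := by
  unfold pvPick
  induction queries using List.reverseRecOn with
  | nil =>
    simp only [List.foldl_nil, List.filter_nil, List.take_nil, pvOrder]
    simp [PySem.Dict.getD_insert, PySem.Dict.getD_empty]
  | append_singleton qs q ih =>
    rw [List.foldl_append, List.foldl_cons, List.foldl_nil, List.filter_append]
    set d := qs.foldl _ _ with hd
    set F := qs.filter (fun q => (PySem.Dict.get? (PySem.Dict.mk q) "type").getD "" == t) with hF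
    by_cases hmatch : (PySem.Dict.get? (PySem.Dict.mk q) "type").getD "" = t
    · have hfq : [q].filter (fun q => (PySem.Dict.get? (PySem.Dict.mk q) "type").getD "" == t) = [q] := by
        simp [hmatch]
      rw [hfq, hmatch]
      have hcont : pvOrder.contains t = true := by simpa using ht
      by_cases hlen : (d.getD t []).length < 2
      · have hFlt : F.length < 2 := by
          rw [ih] at hlen
          simp only [List.length_take] at hlen
          omega
        rw [if_pos (by simp [hlen, ht]), PySem.Dict.getD_modify_self, ih,
            List.take_of_length_le (le_of_lt hFlt),
            List.take_of_length_le (by simpa using Nat.succ_le_of_lt hFlt)]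
      · have hFge : 2 ≤ F.length := by
          rw [ih] at hlen
          simp only [List.length_take] at hlen
          omega
        rw [if_neg (by simp [hlen]), ih, List.take_append_of_le_length hFge]
    · have hfq : [q].filter (fun q => (PySem.Dict.get? (PySem.Dict.mk q) "type").getD "" == t) = [] := by
        simp [hmatch]
      rw [hfq, List.append_nil]
      show (if (pvOrder.contains ((PySem.Dict.get? (PySem.Dict.mk q) "type").getD "") &&
            decide ((d.getD ((PySem.Dict.get? (PySem.Dict.mk q) "type").getD "") []).length < 2)) = true
          then d.modify ((PySem.Dict.get? (PySem.Dict.mk q) "type").getD "") [] (· ++ [q]) else d).getD t []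
        = List.take 2 F
      split
      · rw [PySem.Dict.getD_modify, if_neg (fun h => hmatch h.symm), ih]
      · exact ih

-- On queries whose every member has a "type" key, filtering by 'get? == some t'
-- agrees with filtering by the bucket key 'getD "" == t'.
theorem filter_key_eq (queries : List (List (String × String))) (t : String)
    (h : ∀ q ∈ queries, (PySem.Dict.get? (PySem.Dict.mk q) "type").isSome) :
    queries.filter (fun q => PySem.Dict.get? (PySem.Dict.mk q) "type" == some t)
      = queries.filter (fun q => (PySem.Dict.get? (PySem.Dict.mk q) "type").getD "" == t) := by
  apply List.filter_congr
  intro q hq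
  rcases Option.isSome_iff_exists.mp (h q hq) with ⟨v, hv⟩
  simp [hv]

-- ===== VERDICT (by name: the statement is the Claim_ definition above) =====
theorem filter_queries_spec : Claim_equal_filter_queries := by
  intro queries mode query_type query_id _ hpre
  unfold Spec_filter_queries filter_queries filter_queries_alt
  by_cases hid : pvTruthy query_id = true
  · rcases query_id with _ | s
    · simp [pvTruthy] at hid
    · have hs : s ≠ "" := by simpa [pvTruthy] using hid
      simp [hid]
  · simp only [Bool.not_eq_true] at hid
    by_cases hty : pvTruthy query_type = true
    · rcases query_type with _ | s
      · simp [pvTruthy] at hty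
      · simp [hid, hty]
    · simp only [Bool.not_eq_true] at hty
      by_cases hm : mode == "quick"
      · have hpre' : ∀ q ∈ queries, (PySem.Dict.get? (PySem.Dict.mk q) "type").isSome := by
          unfold Pre_filter_queries at hpre
          simpa [hid, hty, hm] using hpre
        have hmq : mode = "quick" := by simpa using hm
        subst hmq
        simp only [hid, hty, Bool.false_eq_true, if_false, ne_eq, not_true_eq_false,
          Bool.not_false, Bool.and_self, if_true, List.foldl_cons, List.foldl_nil,
          List.nil_append, beq_self_eq_true]
        rw [filter_key_eq queries "single_value" hpre',
            filter_key_eq queries "list" hpre',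
            filter_key_eq queries "comparison" hpre',
            filter_key_eq queries "trend" hpre',
            filter_key_eq queries "analyst" hpre']
        rw [show pvOrder.flatMap (fun t => (pvPick queries).getD t [])
              = (pvPick queries).getD "single_value" [] ++ ((pvPick queries).getD "list" []
                ++ ((pvPick queries).getD "comparison" [] ++ ((pvPick queries).getD "trend" []
                ++ ((pvPick queries).getD "analyst" [] ++ [])))) from by simp [pvOrder]]
        rw [pvPick_getD queries "single_value" (by simp [pvOrder]),
            pvPick_getD queries "list" (by simp [pvOrder]),
            pvPick_getD queries "comparison" (by simp [pvOrder]),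
            pvPick_getD queries "trend" (by simp [pvOrder]),
            pvPick_getD queries "analyst" (by simp [pvOrder])]
        simp
      · simp only [Bool.not_eq_true] at hm
        have hm' : mode ≠ "quick" := by
          intro e; subst e; simp at hm
        simp [hid, hty, hm, hm']
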